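-- pv_equiv track=rewrite | github.com/gmy2013/icse26_failure_refinement | max_special_columns_xorificator/max_special_columns_xorificator/solver.py | _columns_to_patterns
-- ===== SOURCE A (Python) =====
-- from collections import Counter
-- from typing import List, Tuple, Dict
-- from typing import List, Tuple
--
-- def _columns_to_patterns(matrix: List[str]) -> Dict[str, int]:
--     """
--     Groups columns by their bit patterns.
--
--     Args:
--         matrix: List of n strings, each of length m.
--
--     Returns:
--         A dictionary mapping each unique column pattern (as a string) to its frequency.
--     """
--     if not matrix:
--         return {}
--
--     n = len(matrix)
--     m = len(matrix[0])
--     patterns: Counter = Counter()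
--     for col in range(m):
--         pattern = ''.join(matrix[row][col] for row in range(n))
--         patterns[pattern] += 1
--     return dict(patterns)
-- ===== SOURCE B (Python) =====
-- from collections import Counter
--
--
-- def _columns_to_patterns(matrix):
--     """Row-major re-implementation: grow all m column accumulators in
--     parallel, one row at a time, then count with a single Counter pass."""
--     if not matrix:
--         return {}
--     cols = [[] for _ in range(len(matrix[0]))]
--     for row in matrix:
--         for acc, ch in zip(cols, row):
--             acc.append(ch)
--     return dict(Counter(''.join(acc) for acc in cols))
-- ===== Notes on version B (the rewrite author's own statement) =====
-- stated objective: alternative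
-- what changed: Column-major per-column join with a Counter incremented inside the loop is replaced by a row-major pass that grows all m column accumulators in parallel via zip, followed by one Counter(cols) pass.
import Mathlib
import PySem

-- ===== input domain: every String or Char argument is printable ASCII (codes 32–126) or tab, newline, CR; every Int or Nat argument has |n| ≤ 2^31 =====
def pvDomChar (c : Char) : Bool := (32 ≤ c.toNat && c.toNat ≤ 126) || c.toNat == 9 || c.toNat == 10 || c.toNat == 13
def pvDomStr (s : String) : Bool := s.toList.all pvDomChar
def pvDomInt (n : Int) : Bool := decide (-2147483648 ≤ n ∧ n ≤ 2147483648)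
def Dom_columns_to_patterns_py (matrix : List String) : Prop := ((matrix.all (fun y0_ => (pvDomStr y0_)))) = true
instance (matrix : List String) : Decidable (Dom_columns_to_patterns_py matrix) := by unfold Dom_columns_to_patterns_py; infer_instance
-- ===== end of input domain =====

-- B replaces A's column-major "build one column string, bump a Counter" loop by a row-major
-- pass growing all m column accumulators in parallel (zip), then one Counter over the list
-- (objective: alternative decomposition, same O(n*m) cost).

-- ===== PORT A =====
-- Strings are handled as their List Char code points (PySem convention).
def columns_to_patterns_py (matrix : List String) : List (String × Int) :=
  if matrix = [] then []
  else
    let n : Int := matrix.length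
    let m : Int := ((PySem.List.pyGet? matrix 0).getD "").toList.length
    -- for col in range(m): pattern = ''.join(matrix[row][col] for row in range(n)); patterns[pattern] += 1
    let patterns : PySem.Dict String Int :=
      (PySem.List.pyRange 0 m 1).foldl
        (fun d col =>
          let pattern : String :=
            String.ofList ((PySem.List.pyRange 0 n 1).map
              (fun row => (PySem.Str.pyGet? (PySem.List.pyGetD matrix row "") col).getD ' '))
          -- exact under Pre_: every index is in range, so the getD defaults never fire
          d.modify pattern 0 (· + 1))
        PySem.Dict.empty
    patterns.items

-- ===== PORT B =====
-- cols = [[] for _ in range(m)]; for row: for acc, ch in zip(cols, row): acc.append(ch)  (in-place appends ported as rebuilding the list)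
def columns_to_patterns_py_alt (matrix : List String) : List (String × Int) :=
  if matrix = [] then []
  else
    let m : Nat := ((PySem.List.pyGet? matrix 0).getD "").toList.length
    let cols : List (List Char) :=
      matrix.foldl
        (fun cols row =>
          (List.zip cols row.toList).map (fun p => p.1 ++ [p.2]) ++ cols.drop row.toList.length)
        (List.replicate m ([] : List Char))
    (PySem.Dict.counter (cols.map String.ofList)).items

-- ===== PRECONDITION & SPEC =====
-- Pre_ excludes exactly the inputs on which A raises IndexError: a non-empty matrix with
-- some row shorter than the first row.
def Pre_columns_to_patterns_py (matrix : List String) : Prop :=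
  ∀ s ∈ matrix, ((matrix.headD "").toList.length ≤ s.toList.length)
instance (matrix : List String) : Decidable (Pre_columns_to_patterns_py matrix) := by unfold Pre_columns_to_patterns_py; infer_instance
def pvWitness_columns_to_patterns_py : List String := ["01", "10", "11"]

def Spec_columns_to_patterns_py (matrix : List String) (out : List (String × Int)) : Prop := out = columns_to_patterns_py_alt matrix
instance (matrix : List String) (out : List (String × Int)) : Decidable (Spec_columns_to_patterns_py matrix out) := by unfold Spec_columns_to_patterns_py; infer_instance

-- ===== CLAIM (what is proved, stated in full; the proofs are below) =====
def Claim_equal_columns_to_patterns_py : Prop := ∀ (matrix : List String), Dom_columns_to_patterns_py matrix → Pre_columns_to_patterns_py matrix → Spec_columns_to_patterns_py matrix (columns_to_patterns_py matrix)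

-- ===== LEMMAS AND PROOFS =====

-- one row-step of B on an accumulator in "map over range" form
lemma pv_step_map (m : Nat) (g : Nat → List Char) (ys : List Char) (h : m ≤ ys.length) :
    (List.zip ((List.range m).map g) ys).map (fun p => p.1 ++ [p.2])
      = (List.range m).map (fun c => g c ++ [ys.getD c ' ']) := by
  apply List.ext_getElem
  · simp [Nat.min_eq_left h]
  · intro i h1 h2
    simp at h1 h2
    simp [List.getElem_zip, List.getD_eq_getElem?_getD, List.getElem?_eq_getElem (by omega : i < ys.length)]

-- B's whole fold in closed form
lemma pv_fold_map (m : Nat) (rows : List String) (h : ∀ s ∈ rows, m ≤ s.toList.length)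
    (g : Nat → List Char) :
    rows.foldl (fun cols row =>
          (List.zip cols row.toList).map (fun p => p.1 ++ [p.2]) ++ cols.drop row.toList.length)
        ((List.range m).map g)
      = (List.range m).map (fun c => g c ++ rows.map (fun row => row.toList.getD c ' ')) := by
  induction rows generalizing g with
  | nil => simp
  | cons r rs ih =>
    have hr : m ≤ r.toList.length := h r (by simp)
    have hdrop : ((List.range m).map g).drop r.toList.length = [] :=
      List.drop_eq_nil_of_le (by simpa using hr)
    simp only [List.foldl_cons, pv_step_map m g r.toList hr, hdrop, List.append_nil]
    rw [ih (fun s hs => h s (by simp [hs])) (fun c => g c ++ [r.toList.getD c ' '])]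
    simp

theorem columns_to_patterns_py_spec_aux (matrix : List String)
    (hpre : Pre_columns_to_patterns_py matrix) :
    columns_to_patterns_py matrix = columns_to_patterns_py_alt matrix := by
  by_cases hnil : matrix = []
  · simp [columns_to_patterns_py, columns_to_patterns_py_alt, hnil]
  · unfold columns_to_patterns_py columns_to_patterns_py_alt
    simp only [if_neg hnil]
    obtain ⟨hd, tl, rfl⟩ := List.exists_cons_of_ne_nil hnil
    set m : Nat := hd.toList.length with hm
    set f : Nat → List Char :=
      fun c => (hd :: tl).map (fun row => row.toList.getD c ' ') with hf
    have hcols :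
        (hd :: tl).foldl (fun cols row =>
            (List.zip cols row.toList).map (fun p => p.1 ++ [p.2]) ++ cols.drop row.toList.length)
          (List.replicate m ([] : List Char))
        = (List.range m).map f := by
      have hrep : List.replicate m ([] : List Char) = (List.range m).map (fun _ => []) := by
        simp
      rw [hrep, pv_fold_map m (hd :: tl)
        (by intro s hs; simpa [hm] using hpre s hs) (fun _ => ([] : List Char))]
      simp [hf]
    -- A's pattern list over pyRange equals (range m).map (String.ofList ∘ f)
    have hpat : ∀ c : Nat,
        String.ofList ((PySem.List.pyRange 0 ((hd :: tl).length : Int) 1).map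
          (fun row => (PySem.Str.pyGet? (PySem.List.pyGetD (hd :: tl) row "") ((c : Int))).getD ' '))
        = String.ofList (f c) := by
      intro c
      congr 1
      have : (fun row : Int =>
          (PySem.Str.pyGet? (PySem.List.pyGetD (hd :: tl) row "") ((c : Int))).getD ' ')
          = (fun s : String => (PySem.Str.pyGet? s ((c : Int))).getD ' ') ∘
            (fun row : Int => PySem.List.pyGetD (hd :: tl) row "") := rfl
      rw [this, ← List.map_map, PySem.List.map_pyGetD_pyRange_zero']
      simp [hf, List.getD_eq_getElem?_getD]
    have h0 : (PySem.List.pyGet? (hd :: tl) 0).getD "" = hd := by simp [pysem]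
    rw [h0, hcols, PySem.Dict.counter_eq_foldl, List.map_map,
      PySem.List.pyRange_zero_nat hd.toList.length, List.foldl_map, List.foldl_map]
    have hfun : (fun (d : PySem.Dict String Int) (c : Nat) =>
        d.modify (String.ofList ((PySem.List.pyRange 0 ((hd :: tl).length : Int) 1).map
          (fun row => (PySem.Str.pyGet? (PySem.List.pyGetD (hd :: tl) row "") ((c : Int))).getD ' ')))
          0 (· + 1))
        = (fun (d : PySem.Dict String Int) (c : Nat) =>
            d.modify ((String.ofList ∘ f) c) 0 (· + 1)) := by
      funext d c
      rw [hpat c]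
      rfl
    rw [hfun]

-- ===== VERDICT (by name: the statement is the Claim_ definition above) =====
theorem columns_to_patterns_py_spec : Claim_equal_columns_to_patterns_py := by
  intro matrix _ hpre
  exact columns_to_patterns_py_spec_aux matrix hpre
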